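-- pv_equiv track=rewrite | github.com/qwerpoiuqqq/j2lab-platform | reference/keyword-extract/src/keyword_generator.py | _combine_multi_keywords
-- ===== SOURCE A (Python) =====
-- from typing import List, Set, Dict, Optional
--
-- def _combine_multi_keywords(keywords: List[str], count: int) -> List[str]:
--     """
--     키워드 리스트에서 count개를 조합하여 새 키워드 문자열 생성
--     예: ["울쎄라", "보톡스", "필러"], 2 -> ["울쎄라 보톡스", "보톡스 울쎄라", "울쎄라 필러", ...]
--     """
--     from itertools import permutations
--
--     result = []
--     if len(keywords) < count:
--         return result
--
--     # 상위 N개만 사용 (너무 많으면 조합 폭발)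
--     limited = keywords[:10] if count == 2 else keywords[:6]
--
--     for perm in permutations(limited, count):
--         result.append(" ".join(perm))
--
--     return result
-- ===== SOURCE B (Python) =====
-- from typing import List
--
--
-- def _selections(items: List[str]):
--     """All ways to pick one element: (picked, rest in original order)."""
--     if not items:
--         return []
--     head, tail = items[0], items[1:]
--     return [(head, tail)] + [(kw, [head] + rest) for kw, rest in _selections(tail)]
--
--
-- def _combine_multi_keywords(keywords: List[str], count: int) -> List[str]:
--     if len(keywords) < count:
--         return []
--     limited = keywords[:10] if count == 2 else keywords[:6]
--     # breadth-first: expand all partial states one pick per round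
--     states = [([], limited)]
--     for _ in range(count):
--         states = [(chosen + [kw], rest)
--                   for chosen, remaining in states
--                   for kw, rest in _selections(remaining)]
--     return [" ".join(chosen) for chosen, _ in states]
-- ===== Notes on version B (the rewrite author's own statement) =====
-- stated objective: alternative
-- what changed: Replaces the recursive itertools.permutations generator with an iterative breadth-first expansion: a list of (chosen, remaining) states is widened one pick per round for count rounds, using a recursive _selections helper instead of library permutations.
import Mathlib
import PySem

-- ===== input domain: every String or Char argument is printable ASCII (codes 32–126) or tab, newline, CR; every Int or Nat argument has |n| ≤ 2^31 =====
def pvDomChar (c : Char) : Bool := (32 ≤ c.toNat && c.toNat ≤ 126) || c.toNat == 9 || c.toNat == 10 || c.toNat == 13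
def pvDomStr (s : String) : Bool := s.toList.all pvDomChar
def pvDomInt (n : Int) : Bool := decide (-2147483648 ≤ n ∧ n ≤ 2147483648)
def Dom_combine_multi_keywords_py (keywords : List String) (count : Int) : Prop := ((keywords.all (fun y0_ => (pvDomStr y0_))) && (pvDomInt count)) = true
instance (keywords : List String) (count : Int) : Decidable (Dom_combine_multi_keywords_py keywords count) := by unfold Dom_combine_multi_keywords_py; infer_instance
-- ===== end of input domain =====

-- B replaces the itertools.permutations generator with an iterative breadth-first
-- expansion of (chosen, remaining) states (objective: alternative decomposition).
-- ===== PORT A =====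
def combine_multi_keywords_py (keywords : List String) (count : Int) : List String :=
  if (keywords.length : Int) < count then []
  else
    let limited := if count = 2 then PySem.List.slice keywords none (some 10)
                   else PySem.List.slice keywords none (some 6)
    (PySem.List.permutations limited count.toNat).foldl
      (fun result perm => result ++ [PySem.Str.join " " perm]) []

-- ===== PORT B =====
def bSelections : List String → List (String × List String)
  | [] => []
  | h :: t => (h, t) :: (bSelections t).map (fun p => (p.1, h :: p.2))

def combine_multi_keywords_py_alt (keywords : List String) (count : Int) : List String :=
  if (keywords.length : Int) < count then []
  else
    let limited := if count = 2 then PySem.List.slice keywords none (some 10)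
                   else PySem.List.slice keywords none (some 6)
    let states := (List.range count.toNat).foldl
      (fun sts _ => sts.flatMap (fun st => (bSelections st.2).map (fun p => (st.1 ++ [p.1], p.2))))
      [(([] : List String), limited)]
    states.map (fun st => PySem.Str.join " " st.1)

-- ===== PRECONDITION & SPEC =====
-- Pre_ excludes count < 0, where A raises ValueError (itertools.permutations with negative r).
def Pre_combine_multi_keywords_py (keywords : List String) (count : Int) : Prop := 0 ≤ count
instance (keywords : List String) (count : Int) : Decidable (Pre_combine_multi_keywords_py keywords count) := by unfold Pre_combine_multi_keywords_py; infer_instance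
def pvWitness_combine_multi_keywords_py : List String × Int := (["ul", "bo", "fi"], 2)

def Spec_combine_multi_keywords_py (keywords : List String) (count : Int) (out : List String) : Prop := out = combine_multi_keywords_py_alt keywords count
instance (keywords : List String) (count : Int) (out : List String) : Decidable (Spec_combine_multi_keywords_py keywords count out) := by unfold Spec_combine_multi_keywords_py; infer_instance

-- ===== CLAIM (what is proved, stated in full; the proofs are below) =====
def Claim_equal_combine_multi_keywords_py : Prop := ∀ (keywords : List String) (count : Int), Dom_combine_multi_keywords_py keywords count → Pre_combine_multi_keywords_py keywords count → Spec_combine_multi_keywords_py keywords count (combine_multi_keywords_py keywords count)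

-- ===== LEMMAS AND PROOFS =====

-- the one-round expansion step of B
def bStep (S : List (List String × List String)) : List (List String × List String) :=
  S.flatMap (fun st => (bSelections st.2).map (fun p => (st.1 ++ [p.1], p.2)))

lemma foldl_const_range {α : Type} (f : α → α) (S : α) :
    ∀ n : Nat, (List.range n).foldl (fun s _ => f s) S = f^[n] S := by
  intro n
  induction n with
  | zero => simp
  | succ n ih =>
      rw [List.range_succ, List.foldl_append, ih, List.foldl_cons, List.foldl_nil,
        Function.iterate_succ_apply']

-- index-based selection over a list equals the structural bSelections
lemma rangeSel {β : Type} : ∀ (t : List String) (f : String → List String → List β),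
    (List.range t.length).flatMap
      (fun i => match t[i]? with
        | none => []
        | some y => f y (t.eraseIdx i))
    = (bSelections t).flatMap (fun p => f p.1 p.2) := by
  intro t
  induction t with
  | nil => intro f; simp [bSelections]
  | cons h tl ih =>
      intro f
      rw [List.length_cons, List.range_succ_eq_map, List.flatMap_cons, List.flatMap_map]
      simp only [List.getElem?_cons_succ, List.eraseIdx_cons_succ]
      rw [ih (fun y r => f y (h :: r))]
      simp [bSelections, List.flatMap_map]

-- unfolding of PySem.List.permutations at a successor, through bSelections
lemma perms_succ_eq (xs : List String) (n : Nat) :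
    PySem.List.permutations xs (n + 1)
    = (bSelections xs).flatMap (fun p => (PySem.List.permutations p.2 n).map (fun q => p.1 :: q)) := by
  rw [PySem.List.permutations,
    ← rangeSel xs (fun y r => (PySem.List.permutations r n).map (fun q => y :: q))]
  apply List.flatMap_congr
  intro i hi
  have hi' : i < xs.length := by simpa using hi
  rw [List.getElem?_eq_getElem hi']

-- the chosen components after n rounds of bStep are exactly the prefixed permutations
lemma bStep_iterate_fst : ∀ (n : Nat) (S : List (List String × List String)),
    (bStep^[n] S).map Prod.fst
    = S.flatMap (fun st => (PySem.List.permutations st.2 n).map (fun q => st.1 ++ q)) := by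
  intro n
  induction n with
  | zero =>
      intro S
      simp [PySem.List.permutations, List.map_eq_flatMap]
  | succ n ih =>
      intro S
      rw [Function.iterate_succ_apply, ih]
      rw [bStep]
      rw [List.flatMap_assoc]
      apply List.flatMap_congr
      intro st _
      rw [perms_succ_eq, List.map_flatMap, List.flatMap_map]
      apply List.flatMap_congr
      intro p _
      simp

theorem combine_multi_keywords_py_spec : Claim_equal_combine_multi_keywords_py := by
  intro keywords count _ _
  unfold Spec_combine_multi_keywords_py combine_multi_keywords_py combine_multi_keywords_py_alt
  by_cases hlt : (keywords.length : Int) < count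
  · simp [hlt]
  · simp only [hlt, if_false]
    rw [PySem.List.foldl_append_singleton_eq_map]
    rw [show (fun (sts : List (List String × List String)) (_ : Nat) =>
          sts.flatMap (fun st => (bSelections st.2).map (fun p => (st.1 ++ [p.1], p.2))))
        = (fun sts _ => bStep sts) from rfl]
    rw [foldl_const_range bStep]
    rw [show (fun (st : List String × List String) => PySem.Str.join " " st.1)
        = (fun l => PySem.Str.join " " l) ∘ Prod.fst from rfl]
    rw [← List.map_map, bStep_iterate_fst]
    simp
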